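-- pv_equiv track=rewrite | github.com/sdmeehan1986/AdventOfCode | 2015/Day11/day11.py | double_valid
-- ===== SOURCE A (Python) =====
-- def double_valid(data):
--     current = ''
--     pairs = 0
--
--     for a in data:
--         if current == '':
--             current = a
--         elif a != current:
--             current = a
--         elif a == current:
--             pairs += 1
--             current = ''
--
--     return pairs >= 2
-- ===== SOURCE B (Python) =====
-- def double_valid(data):
--     # Stage 1: run-length encode the input into (char, count) runs.
--     runs = []
--     for a in data:
--         if runs and runs[-1][0] == a:
--             runs[-1] = (a, runs[-1][1] + 1)
--         else:
--             runs.append((a, 1))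
--     # Stage 2: a run of length k holds exactly k // 2 non-overlapping pairs.
--     return sum(k // 2 for _, k in runs) >= 2
-- ===== Notes on version B (the rewrite author's own statement) =====
-- stated objective: alternative
-- what changed: Replaced A's held-character state machine with a two-stage algorithm: run-length encode the string into (char,count) runs, then sum floor(count/2) over runs, since a run of k equal chars contains exactly k//2 non-overlapping pairs.
import Mathlib
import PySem

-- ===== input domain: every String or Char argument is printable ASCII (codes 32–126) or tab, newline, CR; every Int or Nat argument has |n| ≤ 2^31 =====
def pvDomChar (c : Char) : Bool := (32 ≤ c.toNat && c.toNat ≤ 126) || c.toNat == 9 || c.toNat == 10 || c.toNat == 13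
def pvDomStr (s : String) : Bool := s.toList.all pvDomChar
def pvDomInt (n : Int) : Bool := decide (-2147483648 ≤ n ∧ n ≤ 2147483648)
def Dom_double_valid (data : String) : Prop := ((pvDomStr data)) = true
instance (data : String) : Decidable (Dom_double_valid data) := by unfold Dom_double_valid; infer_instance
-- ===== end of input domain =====

-- B replaces A's held-character state machine with run-length encoding followed by summing ⌊count/2⌋ per run (objective: alternative; same result).

-- ===== PORT A =====
-- A's loop state: 'current' ('' sentinel modelled as Option Char) and the pair count.
def double_valid_step (st : Option Char × Nat) (a : Char) : Option Char × Nat :=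
  match st with
  | (none, pairs) => (some a, pairs)          -- current == ''
  | (some c, pairs) =>
    if a ≠ c then (some a, pairs)             -- a != current
    else (none, pairs + 1)                    -- a == current

def double_valid (data : String) : Bool :=
  let st := data.toList.foldl double_valid_step (none, 0)
  decide (st.2 ≥ 2)

-- ===== PORT B =====
-- Stage 1 of B: extend the last run or append a fresh one ('runs and runs[-1][0] == a').
def dvRunStep (runs : List (Char × Nat)) (a : Char) : List (Char × Nat) :=
  match runs.getLast? with
  | some (c, k) => if c = a then runs.dropLast ++ [(a, k + 1)] else runs ++ [(a, 1)]
  | none => [(a, 1)]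

-- Stage 2 of B: sum of k // 2 over the runs.
def dvSumHalves (runs : List (Char × Nat)) : Nat := (runs.map (fun p => p.2 / 2)).sum

def double_valid_alt (data : String) : Bool :=
  decide (dvSumHalves (data.toList.foldl dvRunStep []) ≥ 2)

-- ===== PRECONDITION & SPEC =====
def Spec_double_valid (data : String) (out : Bool) : Prop := out = double_valid_alt data
instance (data : String) (out : Bool) : Decidable (Spec_double_valid data out) := by unfold Spec_double_valid; infer_instance

-- ===== CLAIM (what is proved, stated in full; the proofs are below) =====
def Claim_equal_double_valid : Prop := ∀ (data : String), Dom_double_valid data → Spec_double_valid data (double_valid data)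

-- ===== LEMMAS AND PROOFS =====
-- A's 'current' read off B's runs: the last run's char when its count is odd.
def dvParity (runs : List (Char × Nat)) : Option Char :=
  match runs.getLast? with
  | some (c, k) => if k % 2 = 1 then some c else none
  | none => none

theorem dvStep_commute (runs : List (Char × Nat)) (a : Char) :
    double_valid_step (dvParity runs, dvSumHalves runs) a
      = (dvParity (dvRunStep runs a), dvSumHalves (dvRunStep runs a)) := by
  match h : runs.getLast? with
  | none =>
    have : runs = [] := List.getLast?_eq_none_iff.mp h
    subst this
    simp [dvParity, dvRunStep, dvSumHalves, double_valid_step]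
  | some (c, k) =>
    have hne : runs ≠ [] := by
      intro h'; subst h'; simp at h
    have hr : runs.dropLast ++ [(c, k)] = runs := by
      have := List.dropLast_concat_getLast hne
      rwa [show runs.getLast hne = (c, k) from by
        have := List.getLast?_eq_some_getLast (l := runs) hne
        rw [h] at this; exact (Option.some.injEq _ _).mp this.symm] at this
    by_cases hca : c = a
    · subst hca
      rw [← hr]
      by_cases hk : k % 2 = 1
      · -- run odd: A closes a pair, B's run becomes even and gains one half
        simp [dvParity, dvRunStep, dvSumHalves, double_valid_step, hk]
        omega
      · simp [dvParity, dvRunStep, dvSumHalves, double_valid_step, hk]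
        omega
    · have hac : a ≠ c := fun h' => hca h'.symm
      by_cases hk : k % 2 = 1
      · simp [dvParity, dvRunStep, dvSumHalves, double_valid_step, h, hk, hca, hac]
      · simp [dvParity, dvRunStep, dvSumHalves, double_valid_step, h, hk, hca]

theorem dvFold_eq (l : List Char) :
    ∀ (runs : List (Char × Nat)),
      l.foldl double_valid_step (dvParity runs, dvSumHalves runs)
        = (dvParity (l.foldl dvRunStep runs), dvSumHalves (l.foldl dvRunStep runs)) := by
  induction l with
  | nil => intro runs; simp
  | cons a rest ih =>
    intro runs
    simp only [List.foldl_cons, dvStep_commute runs a]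
    exact ih (dvRunStep runs a)

-- ===== VERDICT (by name: the statement is the Claim_ definition above) =====
theorem double_valid_spec : Claim_equal_double_valid := by
  intro data _
  unfold Spec_double_valid double_valid double_valid_alt
  have h := dvFold_eq data.toList []
  simp [dvParity, dvSumHalves] at h
  simp [h, dvSumHalves]
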